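-- pv_equiv track=rewrite | github.com/spcl/dace | dace/transformation/dataflow/hbm_transform.py | _custom_gcd
-- ===== SOURCE A (Python) =====
-- from typing import Any, Dict, Iterable, List, Set, Tuple, Union
-- import math
--
-- def _custom_gcd(should_divide: List[int]) -> int:
--     """
--     :return: the gcd of the passed list. None elements
--     are ignored (assumed to be divisable by everything).
--     If all elements are none, this returns None.
--     """
--     current = None
--     for v in should_divide:
--         if v is not None and current is None:
--             current = v
--         elif v is not None and current is not None:
--             current = math.gcd(current, v)
--     return current
-- ===== SOURCE B (Python) =====
-- import math
-- from typing import List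
--
-- def _custom_gcd(should_divide: List[int]) -> int:
--     """Divide-and-conquer: split the list in half, gcd each half recursively,
--     and combine the two optional results (gcd is associative and commutative)."""
--     n = len(should_divide)
--     if n == 0:
--         return None
--     if n == 1:
--         return should_divide[0]
--     mid = n // 2
--     left = _custom_gcd(should_divide[:mid])
--     right = _custom_gcd(should_divide[mid:])
--     if left is None:
--         return right
--     if right is None:
--         return left
--     return math.gcd(left, right)
-- ===== Notes on version B (the rewrite author's own statement) =====
-- stated objective: alternative
-- what changed: Replaces A's single left-to-right conditional-accumulator fold by a divide-and-conquer recursion: split the list in half, recursively gcd each half, and combine the two optional results (correct because gcd is associative and commutative).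
import Mathlib
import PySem

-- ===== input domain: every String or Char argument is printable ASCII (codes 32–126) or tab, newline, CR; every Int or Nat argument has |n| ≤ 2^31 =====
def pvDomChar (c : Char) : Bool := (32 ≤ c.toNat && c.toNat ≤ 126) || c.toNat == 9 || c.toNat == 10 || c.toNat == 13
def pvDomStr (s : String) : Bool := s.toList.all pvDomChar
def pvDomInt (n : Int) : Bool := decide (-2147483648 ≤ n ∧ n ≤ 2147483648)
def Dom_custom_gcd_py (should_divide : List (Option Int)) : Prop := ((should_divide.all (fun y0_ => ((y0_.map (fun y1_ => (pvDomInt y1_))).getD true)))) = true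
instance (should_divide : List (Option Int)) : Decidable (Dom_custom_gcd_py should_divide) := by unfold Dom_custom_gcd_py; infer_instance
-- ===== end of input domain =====

-- B replaces A's left-to-right fold by a divide-and-conquer recursion (objective: alternative).

-- ===== PORT A =====
-- math.gcd on ints is the nonnegative gcd: (Int.gcd a b : Int) is exact.
def custom_gcd_py (should_divide : List (Option Int)) : Option Int :=
  should_divide.foldl
    (fun current v =>
      match v, current with
      | some x, none => some x
      | some x, some c => some ((Int.gcd c x : Int))
      | none, _ => current)
    none

-- ===== PORT B =====
-- xs[:mid] = take mid and xs[mid:] = drop mid are exact since 0 ≤ mid ≤ len(xs);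
-- xs[0] for a nonempty list is headD.
def custom_gcd_py_alt (should_divide : List (Option Int)) : Option Int :=
  if should_divide.length = 0 then none
  else if should_divide.length = 1 then should_divide.headD none
  else
    let mid := should_divide.length / 2
    let left := custom_gcd_py_alt (should_divide.take mid)
    let right := custom_gcd_py_alt (should_divide.drop mid)
    match left, right with
    | none, _ => right
    | some _, none => left
    | some a, some b => some ((Int.gcd a b : Int))
termination_by should_divide.length
decreasing_by
  · simp only [List.length_take]; omega
  · simp only [List.length_drop]; omega

-- ===== PRECONDITION & SPEC =====
def Spec_custom_gcd_py (should_divide : List (Option Int)) (out : Option Int) : Prop := out = custom_gcd_py_alt should_divide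
instance (should_divide : List (Option Int)) (out : Option Int) : Decidable (Spec_custom_gcd_py should_divide out) := by unfold Spec_custom_gcd_py; infer_instance

-- ===== CLAIM (what is proved, stated in full; the proofs are below) =====
def Claim_equal_custom_gcd_py : Prop := ∀ (should_divide : List (Option Int)), Dom_custom_gcd_py should_divide → Spec_custom_gcd_py should_divide (custom_gcd_py should_divide)

-- ===== LEMMAS AND PROOFS =====

-- the non-None values
def vals (l : List (Option Int)) : List Int := l.filterMap id

theorem vals_cons_none (t : List (Option Int)) : vals (none :: t) = vals t := rfl
theorem vals_cons_some (x : Int) (t : List (Option Int)) : vals (some x :: t) = x :: vals t := rfl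
theorem vals_append (l₁ l₂ : List (Option Int)) : vals (l₁ ++ l₂) = vals l₁ ++ vals l₂ := by
  simp [vals]

-- gcd-of-natAbs fold, the common value both programs compute
def gN (l : List Int) (n : Nat) : Nat := l.foldl (fun m v => Nat.gcd m v.natAbs) n

-- canonical result as a function of the non-None values
def canon (vs : List Int) : Option Int :=
  match vs with
  | [] => none
  | [x] => some x
  | x :: y :: t => some ((gN t (Nat.gcd x.natAbs y.natAbs) : Int))

theorem gN_gcd (l : List Int) : ∀ a b : Nat, gN l (Nat.gcd a b) = Nat.gcd a (gN l b) := by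
  induction l with
  | nil => intro a b; rfl
  | cons v t ih =>
    intro a b
    show gN t (Nat.gcd (Nat.gcd a b) v.natAbs) = Nat.gcd a (gN t (Nat.gcd b v.natAbs))
    rw [Nat.gcd_assoc, ih]

theorem gN_append (l₁ l₂ : List Int) (n : Nat) : gN (l₁ ++ l₂) n = gN l₂ (gN l₁ n) :=
  List.foldl_append

theorem canon_natAbs (vs : List Int) (a : Int) (h : canon vs = some a) :
    a.natAbs = gN vs 0 := by
  match vs with
  | [] => simp [canon] at h
  | [x] =>
    simp [canon] at h
    simp [← h, gN, Nat.gcd_zero_left]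
  | x :: y :: t =>
    simp [canon] at h
    rw [← h]
    simp [gN, Nat.gcd_zero_left]

theorem canon_none (vs : List Int) : canon vs = none ↔ vs = [] := by
  match vs with
  | [] => simp [canon]
  | [x] => simp [canon]
  | x :: y :: t => simp [canon]

theorem canon_two (x y : Int) (t : List Int) :
    canon (x :: y :: t) = some ((gN (x :: y :: t) 0 : Nat) : Int) := by
  simp [canon, gN, Nat.gcd_zero_left]

theorem canon_combine (L R : List Int) (a b : Int)
    (hL : canon L = some a) (hR : canon R = some b) :
    canon (L ++ R) = some ((Int.gcd a b : Int)) := by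
  have hLne : L ≠ [] := by intro h; rw [h] at hL; simp [canon] at hL
  have hRne : R ≠ [] := by intro h; rw [h] at hR; simp [canon] at hR
  obtain ⟨x, L', rfl⟩ := List.exists_cons_of_ne_nil hLne
  obtain ⟨y, R', rfl⟩ := List.exists_cons_of_ne_nil hRne
  have hcons : (x :: L') ++ (y :: R') = x :: (L' ++ y :: R') := by simp
  have hne : L' ++ y :: R' ≠ [] := by simp
  obtain ⟨z, T, hT⟩ := List.exists_cons_of_ne_nil hne
  rw [hcons, hT, canon_two, ← hT]
  have h1 : a.natAbs = gN (x :: L') 0 := canon_natAbs _ _ hL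
  have h2 : b.natAbs = gN (y :: R') 0 := canon_natAbs _ _ hR
  have key : Int.gcd a b = gN (x :: (L' ++ y :: R')) 0 := by
    have hsplit : x :: (L' ++ y :: R') = (x :: L') ++ (y :: R') := by simp
    rw [hsplit, gN_append, ← h1]
    unfold Int.gcd
    rw [h2]
    have := gN_gcd (y :: R') a.natAbs 0
    rw [Nat.gcd_zero_right] at this
    exact this.symm
  rw [key]

-- A's loop body
def stepA : Option Int → Option Int → Option Int :=
  fun current v =>
    match v, current with
    | some x, none => some x
    | some x, some c => some ((Int.gcd c x : Int))
    | none, _ => current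

theorem custom_gcd_py_def (l : List (Option Int)) :
    custom_gcd_py l = l.foldl stepA none := rfl

-- A's fold from a some-accumulator
theorem foldA_some (l : List (Option Int)) : ∀ c : Int,
    l.foldl stepA (some c)
    = some (if vals l = [] then c else ((gN (vals l) c.natAbs : Nat) : Int)) := by
  induction l with
  | nil => intro c; rfl
  | cons h t ih =>
    intro c
    cases h with
    | none =>
      rw [List.foldl_cons, show stepA (some c) none = some c from rfl, ih, vals_cons_none]
    | some x =>
      rw [List.foldl_cons, show stepA (some c) (some x) = some ((Int.gcd c x : Int)) from rfl,
        ih, vals_cons_some]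
      have habs : ((Int.gcd c x : Int)).natAbs = Nat.gcd c.natAbs x.natAbs := by
        simp [Int.gcd]
      by_cases hte : vals t = []
      · rw [if_pos hte, hte, if_neg (by simp)]
        simp [gN, Int.gcd]
      · rw [if_neg hte, if_neg (by simp), habs]
        rfl

theorem A_eq_canon (l : List (Option Int)) :
    custom_gcd_py l = canon (vals l) := by
  induction l with
  | nil => rfl
  | cons h t ih =>
    cases h with
    | none =>
      rw [custom_gcd_py_def, List.foldl_cons, show stepA none none = none from rfl,
        vals_cons_none, ← custom_gcd_py_def]
      exact ih
    | some x =>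
      rw [custom_gcd_py_def, List.foldl_cons, show stepA none (some x) = some x from rfl,
        foldA_some, vals_cons_some]
      by_cases hte : vals t = []
      · rw [if_pos hte, hte]; rfl
      · obtain ⟨y, t', ht⟩ := List.exists_cons_of_ne_nil hte
        rw [if_neg hte, ht]
        show some ((gN (y :: t') x.natAbs : Nat) : Int)
          = some ((gN t' (Nat.gcd x.natAbs y.natAbs) : Nat) : Int)
        rfl

theorem B_eq_canon : ∀ (n : Nat) (l : List (Option Int)), l.length = n →
    custom_gcd_py_alt l = canon (vals l) := by
  intro n
  induction n using Nat.strong_induction_on with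
  | _ n ih =>
    intro l hl
    unfold custom_gcd_py_alt
    by_cases h0 : l.length = 0
    · rw [if_pos h0]
      rw [List.length_eq_zero_iff] at h0
      subst h0; rfl
    by_cases h1 : l.length = 1
    · rw [if_neg h0, if_pos h1]
      rw [List.length_eq_one_iff] at h1
      obtain ⟨a, rfl⟩ := h1
      cases a <;> rfl
    rw [if_neg h0, if_neg h1]
    have hlen2 : 2 ≤ l.length := by omega
    have htl : (l.take (l.length / 2)).length < n := by
      rw [List.length_take]; omega
    have hdl : (l.drop (l.length / 2)).length < n := by
      rw [List.length_drop]; omega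
    have ihL := ih _ htl (l.take (l.length / 2)) rfl
    have ihR := ih _ hdl (l.drop (l.length / 2)) rfl
    simp only []
    rw [ihL, ihR]
    have hsplit : vals (l.take (l.length / 2)) ++ vals (l.drop (l.length / 2)) = vals l := by
      rw [← vals_append, List.take_append_drop]
    cases hL : canon (vals (l.take (l.length / 2))) with
    | none =>
      rw [(canon_none _).mp hL, List.nil_append] at hsplit
      show canon (vals (l.drop (l.length / 2))) = canon (vals l)
      rw [hsplit]
    | some a =>
      cases hR : canon (vals (l.drop (l.length / 2))) with
      | none =>
        rw [(canon_none _).mp hR, List.append_nil] at hsplit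
        show some a = canon (vals l)
        rw [← hsplit]
        exact hL.symm
      | some b =>
        show some ((Int.gcd a b : Int)) = canon (vals l)
        rw [← hsplit]
        exact (canon_combine _ _ a b hL hR).symm

-- ===== VERDICT (by name: the statement is the Claim_ definition above) =====
theorem custom_gcd_py_spec : Claim_equal_custom_gcd_py := by
  intro l _
  show custom_gcd_py l = custom_gcd_py_alt l
  rw [A_eq_canon, B_eq_canon l.length l rfl]
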